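-- pv_equiv track=rewrite | github.com/kailliang/Document-Intelligence | server/app/agents/legal_agent.py | _classify_legal_issue_type
-- ===== SOURCE A (Python) =====
-- def _classify_legal_issue_type(description: str) -> str:
--     """
--     Classify the type of legal issue based on description.
--
--     Args:
--         description: Issue description
--
--     Returns:
--         Classified issue type
--     """
--     description_lower = description.lower()
--
--     if any(keyword in description_lower for keyword in ["claim", "dependent", "independent", "scope"]):
--         return "Claim Construction"
--     elif any(keyword in description_lower for keyword in ["compliance", "requirement", "regulation", "uspto"]):
--         return "Regulatory Compliance"
--     elif any(keyword in description_lower for keyword in ["enablement", "written description", "best mode"]):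
--         return "Disclosure Requirements"
--     elif any(keyword in description_lower for keyword in ["terminology", "language", "legal", "phrase"]):
--         return "Legal Language"
--     elif any(keyword in description_lower for keyword in ["vulnerability", "risk", "enforceability", "validity"]):
--         return "Legal Risk Assessment"
--     elif any(keyword in description_lower for keyword in ["prior art", "novelty", "obviousness"]):
--         return "Patentability"
--     else:
--         return "Legal Compliance"
-- ===== SOURCE B (Python) =====
-- # B: one flat keyword->category-index map; take the MINIMUM matched category
-- # index (= earliest group) in a single pass, then index into a label table.
-- _KEYWORD_CATEGORY = {
--     "claim": 0, "dependent": 0, "independent": 0, "scope": 0,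
--     "compliance": 1, "requirement": 1, "regulation": 1, "uspto": 1,
--     "enablement": 2, "written description": 2, "best mode": 2,
--     "terminology": 3, "language": 3, "legal": 3, "phrase": 3,
--     "vulnerability": 4, "risk": 4, "enforceability": 4, "validity": 4,
--     "prior art": 5, "novelty": 5, "obviousness": 5,
-- }
--
-- _LABELS = [
--     "Claim Construction",
--     "Regulatory Compliance",
--     "Disclosure Requirements",
--     "Legal Language",
--     "Legal Risk Assessment",
--     "Patentability",
--     "Legal Compliance",
-- ]
--
--
-- def _classify_legal_issue_type(description: str) -> str:
--     description_lower = description.lower()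
--     best = 6  # default: "Legal Compliance"
--     for keyword, category in _KEYWORD_CATEGORY.items():
--         if keyword in description_lower:
--             best = min(best, category)
--     return _LABELS[best]
-- ===== Notes on version B (the rewrite author's own statement) =====
-- stated objective: alternative
-- what changed: Replaced the ordered if/elif early-return chain of per-group any() tests with a single pass over one flat keyword-to-category-index map that computes the minimum matched category index and indexes into a label table (no early return, different aggregation).
import Mathlib
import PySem

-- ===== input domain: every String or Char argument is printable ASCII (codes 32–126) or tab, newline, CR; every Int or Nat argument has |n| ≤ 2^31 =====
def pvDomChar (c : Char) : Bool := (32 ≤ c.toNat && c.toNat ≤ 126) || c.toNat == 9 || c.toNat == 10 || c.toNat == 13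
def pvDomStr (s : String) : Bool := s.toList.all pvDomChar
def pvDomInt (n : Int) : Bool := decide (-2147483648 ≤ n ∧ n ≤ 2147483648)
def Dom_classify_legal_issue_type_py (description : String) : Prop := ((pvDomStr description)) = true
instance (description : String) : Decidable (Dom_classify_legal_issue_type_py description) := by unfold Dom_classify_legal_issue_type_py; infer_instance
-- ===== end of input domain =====

-- B replaces A's if/elif early-return chain by a single pass over a flat
-- keyword→category-index map, taking the minimum matched index (alternative; same cost).

-- ===== PORT A =====
def classify_legal_issue_type_py (description : String) : String :=
  let description_lower := PySem.Str.lower description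
  if (["claim", "dependent", "independent", "scope"] : List String).any
      (fun keyword => PySem.Str.isIn keyword description_lower) then
    "Claim Construction"
  else if (["compliance", "requirement", "regulation", "uspto"] : List String).any
      (fun keyword => PySem.Str.isIn keyword description_lower) then
    "Regulatory Compliance"
  else if (["enablement", "written description", "best mode"] : List String).any
      (fun keyword => PySem.Str.isIn keyword description_lower) then
    "Disclosure Requirements"
  else if (["terminology", "language", "legal", "phrase"] : List String).any
      (fun keyword => PySem.Str.isIn keyword description_lower) then
    "Legal Language"
  else if (["vulnerability", "risk", "enforceability", "validity"] : List String).any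
      (fun keyword => PySem.Str.isIn keyword description_lower) then
    "Legal Risk Assessment"
  else if (["prior art", "novelty", "obviousness"] : List String).any
      (fun keyword => PySem.Str.isIn keyword description_lower) then
    "Patentability"
  else
    "Legal Compliance"

-- ===== PORT B =====
-- flat dict keyword → category index (insertion order, as in Source B)
def keywordCategory : List (String × Nat) :=
  [("claim", 0), ("dependent", 0), ("independent", 0), ("scope", 0),
   ("compliance", 1), ("requirement", 1), ("regulation", 1), ("uspto", 1),
   ("enablement", 2), ("written description", 2), ("best mode", 2),
   ("terminology", 3), ("language", 3), ("legal", 3), ("phrase", 3),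
   ("vulnerability", 4), ("risk", 4), ("enforceability", 4), ("validity", 4),
   ("prior art", 5), ("novelty", 5), ("obviousness", 5)]

def labelTable : List String :=
  ["Claim Construction", "Regulatory Compliance", "Disclosure Requirements",
   "Legal Language", "Legal Risk Assessment", "Patentability", "Legal Compliance"]

def classify_legal_issue_type_py_alt (description : String) : String :=
  let description_lower := PySem.Str.lower description
  let best := keywordCategory.foldl
    (fun best kv => if PySem.Str.isIn kv.1 description_lower then min best kv.2 else best) 6
  -- _LABELS[best]: best is always 0..6, so plain getD is Python's in-range indexing
  labelTable.getD best "Legal Compliance"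

-- ===== PRECONDITION & SPEC =====
def Spec_classify_legal_issue_type_py (description : String) (out : String) : Prop := out = classify_legal_issue_type_py_alt description
instance (description : String) (out : String) : Decidable (Spec_classify_legal_issue_type_py description out) := by unfold Spec_classify_legal_issue_type_py; infer_instance

-- ===== CLAIM (what is proved, stated in full; the proofs are below) =====
def Claim_equal_classify_legal_issue_type_py : Prop := ∀ (description : String), Dom_classify_legal_issue_type_py description → Spec_classify_legal_issue_type_py description (classify_legal_issue_type_py description)

-- ===== LEMMAS AND PROOFS =====

-- folding the min-step over a block of keywords all mapped to the same index c
theorem fold_group (dl : String) (c : Nat) (kws : List String) (acc : Nat) :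
    ((kws.map (fun k => (k, c))).foldl
      (fun best kv => if PySem.Str.isIn kv.1 dl then min best kv.2 else best) acc)
    = if kws.any (fun k => PySem.Str.isIn k dl) then min acc c else acc := by
  induction kws generalizing acc with
  | nil => simp
  | cons k rest ih =>
    simp only [List.map_cons, List.foldl_cons, List.any_cons, ih]
    rcases Bool.eq_false_or_eq_true (PySem.Str.isIn k dl) with hk | hk <;>
      rcases Bool.eq_false_or_eq_true (rest.any (fun k => PySem.Str.isIn k dl)) with hrest | hrest <;>
        simp only [hk, hrest, Bool.true_or, Bool.false_or, if_true, if_false,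
          Bool.false_eq_true] <;> omega

theorem classify_spec_aux (description : String) :
    classify_legal_issue_type_py description = classify_legal_issue_type_py_alt description := by
  unfold classify_legal_issue_type_py classify_legal_issue_type_py_alt
  have htab : keywordCategory =
      ((["claim", "dependent", "independent", "scope"] : List String).map (fun k => (k, 0)))
      ++ ((["compliance", "requirement", "regulation", "uspto"] : List String).map (fun k => (k, 1)))
      ++ ((["enablement", "written description", "best mode"] : List String).map (fun k => (k, 2)))
      ++ ((["terminology", "language", "legal", "phrase"] : List String).map (fun k => (k, 3)))
      ++ ((["vulnerability", "risk", "enforceability", "validity"] : List String).map (fun k => (k, 4)))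
      ++ ((["prior art", "novelty", "obviousness"] : List String).map (fun k => (k, 5))) := rfl
  rw [htab]
  simp only [List.foldl_append, fold_group]
  generalize (["claim", "dependent", "independent", "scope"] : List String).any
      (fun keyword => PySem.Str.isIn keyword (PySem.Str.lower description)) = g0
  generalize (["compliance", "requirement", "regulation", "uspto"] : List String).any
      (fun keyword => PySem.Str.isIn keyword (PySem.Str.lower description)) = g1
  generalize (["enablement", "written description", "best mode"] : List String).any
      (fun keyword => PySem.Str.isIn keyword (PySem.Str.lower description)) = g2
  generalize (["terminology", "language", "legal", "phrase"] : List String).any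
      (fun keyword => PySem.Str.isIn keyword (PySem.Str.lower description)) = g3
  generalize (["vulnerability", "risk", "enforceability", "validity"] : List String).any
      (fun keyword => PySem.Str.isIn keyword (PySem.Str.lower description)) = g4
  generalize (["prior art", "novelty", "obviousness"] : List String).any
      (fun keyword => PySem.Str.isIn keyword (PySem.Str.lower description)) = g5
  cases g0 <;> cases g1 <;> cases g2 <;> cases g3 <;> cases g4 <;> cases g5 <;> rfl

-- ===== VERDICT (by name: the statement is the Claim_ definition above) =====
theorem classify_legal_issue_type_py_spec : Claim_equal_classify_legal_issue_type_py := by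
  intro description _
  unfold Spec_classify_legal_issue_type_py
  exact classify_spec_aux description
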